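-- pv_equiv track=rewrite | github.com/moisamidi/discrete_lab2 | lz77.py | repetition_length
-- ===== SOURCE A (Python) =====
-- def repetition_length(window, text):
--     '''
--     Finds how long the window repeats for
--     '''
--     length = 0
--     while text:
--         if window[0] == text[0]:
--             length += 1
--             window = window[1:] + text[0]
--             text = text[1:]
--         else:
--             break
--     return length
-- ===== SOURCE B (Python) =====
-- def repetition_length(window, text):
--     '''
--     Finds how long the window repeats for
--     '''
--     if not text:
--         return 0
--     repeated = window * (len(text) // len(window) + 1)
--     n = 0
--     for a, b in zip(text, repeated):
--         if a != b:
--             break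
--         n += 1
--     return n
-- ===== Notes on version B (the rewrite author's own statement) =====
-- stated objective: faster
-- what changed: Instead of rotating the window by re-slicing it one character per consumed character, B materializes the cyclic expansion window*(len(text)//len(window)+1) once and returns the longest-common-prefix length of text with it in a single zip scan.
import Mathlib
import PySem

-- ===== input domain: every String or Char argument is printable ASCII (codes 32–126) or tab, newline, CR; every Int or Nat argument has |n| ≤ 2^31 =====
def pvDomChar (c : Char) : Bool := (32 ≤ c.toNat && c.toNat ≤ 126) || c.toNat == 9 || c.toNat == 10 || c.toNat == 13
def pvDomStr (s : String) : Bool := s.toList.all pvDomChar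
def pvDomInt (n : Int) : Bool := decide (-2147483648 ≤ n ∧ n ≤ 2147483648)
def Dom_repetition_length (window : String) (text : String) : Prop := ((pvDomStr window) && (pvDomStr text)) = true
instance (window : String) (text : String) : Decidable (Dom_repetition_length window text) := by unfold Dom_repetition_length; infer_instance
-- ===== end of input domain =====

-- B replaces A's rotate-window-per-character scan (which copies the window each step) by
-- materializing the cyclic expansion once and taking the longest common prefix in one pass.


-- ===== PORT A =====
-- while text: if window[0]==text[0]: length+=1; window = window[1:]+text[0]; text = text[1:] else break
-- (window[0] on empty window raises IndexError in Python; that input is excluded by Pre_ below,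
--  the port returns the accumulator there)
def repALoop : List Char → List Char → Int → Int
  | _, [], len => len
  | w, t :: ts, len =>
    match w with
    | [] => len  -- Python raises IndexError here; outside Pre_
    | c :: ws => if c == t then repALoop (ws ++ [t]) ts (len + 1) else len

def repetition_length (window : String) (text : String) : Int :=
  repALoop window.toList text.toList 0

-- ===== PORT B =====
-- longest-common-prefix scan of Source B's zip loop
def pvLcp : List Char → List Char → Int
  | a :: as, b :: bs => if a == b then 1 + pvLcp as bs else 0
  | _, _ => 0

def repetition_length_alt (window : String) (text : String) : Int :=
  let t := text.toList
  if t.isEmpty then 0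
  else
    let w := window.toList
    let k := (PySem.Int.floordiv (t.length : Int) (w.length : Int) + 1).toNat
    let repeated := (List.replicate k w).flatten
    pvLcp t repeated

-- ===== PRECONDITION & SPEC =====
-- Pre_ excludes empty window with non-empty text: there A raises IndexError (window[0])
-- and B raises ZeroDivisionError (len(text) // len(window)).
def Pre_repetition_length (window : String) (text : String) : Prop :=
  window ≠ "" ∨ text = ""
instance (window : String) (text : String) : Decidable (Pre_repetition_length window text) := by
  unfold Pre_repetition_length; infer_instance

def pvWitness_repetition_length : String × String := ("ab", "abab")

def Spec_repetition_length (window : String) (text : String) (out : Int) : Prop := out = repetition_length_alt window text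
instance (window : String) (text : String) (out : Int) : Decidable (Spec_repetition_length window text out) := by unfold Spec_repetition_length; infer_instance

-- ===== CLAIM (what is proved, stated in full; the proofs are below) =====
def Claim_equal_repetition_length : Prop := ∀ (window : String) (text : String), Dom_repetition_length window text → Pre_repetition_length window text → Spec_repetition_length window text (repetition_length window text)

-- ===== LEMMAS AND PROOFS =====

-- pvLcp only inspects the first |t| characters of its second argument
theorem pvLcp_eq_of_prefix : ∀ (t s₁ s₂ : List Char), s₁ <+: s₂ → t.length ≤ s₁.length →
    pvLcp t s₁ = pvLcp t s₂ := by
  intro t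
  induction t with
  | nil => intro s₁ s₂ _ _; cases s₁ <;> cases s₂ <;> simp [pvLcp]
  | cons c ts ih =>
    intro s₁ s₂ hpre hlen
    cases s₁ with
    | nil => simp at hlen
    | cons b bs =>
      obtain ⟨r, hr⟩ := hpre
      subst hr
      simp only [List.cons_append, pvLcp]
      by_cases h : c == b
      · simp only [h, if_true]
        have : pvLcp ts bs = pvLcp ts (bs ++ r) := ih bs (bs ++ r) ⟨r, rfl⟩ (by simpa using hlen)
        omega
      · simp [h]

theorem rot_flatten : ∀ (m : Nat) (ws : List Char) (d : Char),
    ws ++ (List.replicate m (d :: ws)).flatten = (List.replicate m (ws ++ [d])).flatten ++ ws := by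
  intro m
  induction m with
  | zero => simp
  | succ m ih =>
    intro ws d
    simp only [List.replicate_succ, List.flatten_cons]
    rw [← List.append_assoc]
    calc ws ++ (d :: ws) ++ (List.replicate m (d :: ws)).flatten
        = (ws ++ [d]) ++ (ws ++ (List.replicate m (d :: ws)).flatten) := by simp
      _ = (ws ++ [d]) ++ ((List.replicate m (ws ++ [d])).flatten ++ ws) := by rw [ih]
      _ = (List.replicate (m+1) (ws ++ [d])).flatten ++ ws := by
          simp [List.replicate_succ]

theorem repALoop_eq_lcp : ∀ (t w : List Char) (len : Int) (m : Nat), w ≠ [] →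
    t.length ≤ w.length * m →
    repALoop w t len = len + pvLcp t (List.replicate m w).flatten := by
  intro t
  induction t with
  | nil =>
    intro w len m _ _
    have : pvLcp [] (List.replicate m w).flatten = 0 := by
      cases (List.replicate m w).flatten <;> simp [pvLcp]
    simp [repALoop, this]
  | cons c ts ih =>
    intro w len m hw hlen
    cases w with
    | nil => exact absurd rfl hw
    | cons d ws =>
      cases m with
      | zero => simp at hlen
      | succ m =>
        simp only [List.replicate_succ, List.flatten_cons, List.cons_append, pvLcp, repALoop]
        by_cases hdc : c = d
        · subst hdc
          simp only [BEq.rfl, if_true]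
          have hprod : (ws.length + 1) * (m + 1) = m * (ws.length + 1) + ws.length + 1 := by ring
          simp only [List.length_cons] at hlen
          have heq : pvLcp ts (ws ++ (List.replicate m (c :: ws)).flatten)
              = pvLcp ts (List.replicate (m + 1) (ws ++ [c])).flatten := by
            rw [rot_flatten]
            apply pvLcp_eq_of_prefix
            · exact ⟨[c], by simp [List.replicate_succ', List.append_assoc]⟩
            · simp only [List.length_append, List.length_flatten]
              have : ((List.replicate m (ws ++ [c])).map List.length).sum = m * (ws.length + 1) := by
                simp [List.map_replicate, List.sum_replicate, smul_eq_mul]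
              omega
          have hlen' : ts.length ≤ (ws ++ [c]).length * (m + 1) := by
            simp only [List.length_append, List.length_singleton]
            omega
          have := ih (ws ++ [c]) (len + 1) (m + 1) (by simp) hlen'
          rw [this, ← heq]
          omega
        · have h1 : (d == c) = false := by simp; exact fun h => hdc h.symm
          have h2 : (c == d) = false := by simp; exact hdc
          simp [h1, h2]

-- PySem floordiv on Nat casts
theorem floordiv_len (a b : Nat) :
    (PySem.Int.floordiv (a : Int) (b : Int) + 1).toNat = a / b + 1 := by
  rw [PySem.Int.floordiv_natCast]
  rw [show ((a / b : Nat) : Int) + 1 = ((a / b + 1 : Nat) : Int) by push_cast; ring]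
  exact Int.toNat_natCast _

-- ===== VERDICT (by name: the statement is the Claim_ definition above) =====
theorem repetition_length_spec : Claim_equal_repetition_length := by
  unfold Claim_equal_repetition_length
  intro window text _ hpre
  unfold Spec_repetition_length repetition_length repetition_length_alt
  by_cases ht : text.toList.isEmpty
  · have : text.toList = [] := by simpa [List.isEmpty_iff] using ht
    simp [this, repALoop]
  · have htne : text.toList ≠ [] := by simpa [List.isEmpty_iff] using ht
    have hwne : window.toList ≠ [] := by
      rcases hpre with h | h
      · intro hc
        apply h
        have := congrArg String.ofList hc
        simpa using this
      · exact absurd (by simp [h]) htne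
    simp only [ht]
    rw [floordiv_len]
    have hlen : text.toList.length ≤ window.toList.length * (text.toList.length / window.toList.length + 1) := by
      have hw0 : 0 < window.toList.length := List.length_pos_iff.mpr hwne
      have h1 := Nat.div_add_mod text.toList.length window.toList.length
      have h2 := Nat.mod_lt text.toList.length hw0
      rw [Nat.mul_add, Nat.mul_one]
      omega
    have := repALoop_eq_lcp text.toList window.toList 0 (text.toList.length / window.toList.length + 1) hwne hlen
    simpa using this
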